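-- pv_equiv track=rewrite | github.com/Thinklab-SJTU/EDA-AI | PRNet/route_env.py | update_cap
-- ===== SOURCE A (Python) =====
-- def update_cap(h, v, g):
--     for i in range(len(g)):
--         for j in range(len(g[0])-1):
--             if g[i][j] == 1 and g[i][j+1] == 1:
--                 h[i][j] += 1
--     for i in range(len(g[0])):
--         for j in range(len(g)-1):
--             if g[j][i] == 1 and g[j+1][i] == 1:
--                 v[j][i] += 1
--     return h, v
-- ===== SOURCE B (Python) =====
-- def update_cap(h, v, g):
--     # Return-value equivalence: A mutates h and v in place; B builds fresh copies.
--     rows, cols = len(g), len(g[0])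
--
--     def runs(seq):
--         # maximal runs of consecutive 1s in seq, as (start, length) pairs
--         out = []
--         start = None
--         for k, x in enumerate(seq):
--             if x == 1:
--                 if start is None:
--                     start = k
--             elif start is not None:
--                 out.append((start, k - start))
--                 start = None
--         if start is not None:
--             out.append((start, len(seq) - start))
--         return out
--
--     def inc_positions(seq):
--         # a run of L consecutive 1s contributes exactly its first L-1 cells
--         return [p for s, L in runs(seq) for p in range(s, s + L - 1)]
--
--     h2 = [row[:] for row in h]
--     v2 = [row[:] for row in v]
--     for i in range(rows):
--         for j in inc_positions(g[i][:cols]):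
--             h2[i][j] += 1
--     for j in range(cols):
--         for i in inc_positions([g[i][j] for i in range(rows)]):
--             v2[i][j] += 1
--     return h2, v2
-- ===== Notes on version B (the rewrite author's own statement) =====
-- stated objective: alternative
-- what changed: A makes two pairwise scans testing every adjacent cell pair and scattering += into h/v in place; B instead run-length decomposes each row and each extracted column into maximal runs of consecutive 1s and increments the first L-1 cells of every length-L run (a run of L ones contains exactly its first L-1 adjacent pairs), building fresh h/v copies (return-value equivalence; A mutates in place).
-- outside the precondition, e.g. on update_cap([], [], [[0, 0], [0]]): A returns ([], []), B raises IndexError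
import Mathlib
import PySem

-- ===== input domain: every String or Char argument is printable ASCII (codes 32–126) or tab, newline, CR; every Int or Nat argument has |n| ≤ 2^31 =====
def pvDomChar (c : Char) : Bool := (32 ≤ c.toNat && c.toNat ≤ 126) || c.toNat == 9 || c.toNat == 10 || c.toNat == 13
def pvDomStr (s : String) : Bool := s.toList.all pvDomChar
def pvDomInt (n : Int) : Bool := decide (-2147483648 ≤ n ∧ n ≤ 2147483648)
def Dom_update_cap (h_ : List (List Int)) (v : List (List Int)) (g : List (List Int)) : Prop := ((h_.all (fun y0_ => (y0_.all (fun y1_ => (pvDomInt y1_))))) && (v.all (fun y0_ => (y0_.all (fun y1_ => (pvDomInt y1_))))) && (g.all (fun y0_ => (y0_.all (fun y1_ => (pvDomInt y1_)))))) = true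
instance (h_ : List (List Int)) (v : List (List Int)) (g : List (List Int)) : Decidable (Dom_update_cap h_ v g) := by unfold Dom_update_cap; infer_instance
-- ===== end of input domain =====

-- B replaces A's pairwise adjacent-cell tests by a run-length decomposition: each row/column is cut
-- into maximal runs of consecutive 1s and a run of length L increments its first L-1 cells; return-value
-- equivalence only — Python A mutates h and v in place, B builds fresh copies.

-- ===== PORT A =====
-- g[i][j] with Python indexing; the defaults are only reachable outside Pre_ (where Python raises IndexError)
def pvG (g : List (List Int)) (i j : Int) : Int :=
  PySem.List.pyGetD (PySem.List.pyGetD g i []) j 0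

-- h[i][j] += 1; i,j come from range(...) so are ≥ 0 (toNat is exact there); out-of-range -> Python
-- IndexError, excluded by Pre_
def pvBump (m : List (List Int)) (i j : Int) : List (List Int) :=
  m.modify i.toNat (fun r => r.modify j.toNat (· + 1))

def update_cap (h_ : List (List Int)) (v : List (List Int)) (g : List (List Int)) : List (List Int) × List (List Int) :=
  let h1 := (PySem.List.pyRange 0 (g.length : Int)).foldl (fun h i =>
      (PySem.List.pyRange 0 (((PySem.List.pyGetD g 0 []).length : Int) - 1)).foldl (fun h j =>
        if pvG g i j = 1 ∧ pvG g i (j + 1) = 1 then pvBump h i j else h) h) h_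
  let v1 := (PySem.List.pyRange 0 ((PySem.List.pyGetD g 0 []).length : Int)).foldl (fun v' i =>
      (PySem.List.pyRange 0 ((g.length : Int) - 1)).foldl (fun v' j =>
        if pvG g j i = 1 ∧ pvG g (j + 1) i = 1 then pvBump v' j i else v') v') v
  (h1, v1)

-- ===== PORT B =====
-- g[k][l] at Nat indices (B only uses in-range indices inside Pre_; the default mirrors the
-- comprehension [g[i][j] for i in range(rows)], which raises outside Pre_)
def gv (g : List (List Int)) (k l : Nat) : Int := (g.getD k []).getD l 0

-- m[i][j] += 1 at Nat indices (out-of-range -> Python IndexError, excluded by Pre_)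
def bumpN (m : List (List Int)) (i j : Nat) : List (List Int) :=
  m.modify i (fun r => r.modify j (· + 1))

-- Python B's runs(seq): maximal runs of consecutive 1s as (start, length), state = optional run start
def pvRunsAux : List Int → Nat → Option Nat → List (Nat × Nat)
  | [], _, none => []
  | [], k, some s => [(s, k - s)]
  | x :: t, k, none => if x = 1 then pvRunsAux t (k + 1) (some k) else pvRunsAux t (k + 1) none
  | x :: t, k, some s =>
      if x = 1 then pvRunsAux t (k + 1) (some s)
      else (s, k - s) :: pvRunsAux t (k + 1) none

-- Python B's inc_positions: [p for s, L in runs(seq) for p in range(s, s + L - 1)]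
def pvIncPos (seq : List Int) : List Nat :=
  (pvRunsAux seq 0 none).flatMap (fun p => List.range' p.1 (p.2 - 1))

def update_cap_alt (h_ : List (List Int)) (v : List (List Int)) (g : List (List Int)) : List (List Int) × List (List Int) :=
  let rows := g.length
  let cols := (PySem.List.pyGetD g 0 []).length
  -- g[i][:cols] is (g[i]).take cols (slice with a nonnegative bound)
  let h2 := (List.range rows).foldl (fun m i =>
      (pvIncPos ((g.getD i []).take cols)).foldl (fun m j => bumpN m i j) m) h_
  let v2 := (List.range cols).foldl (fun m j =>
      (pvIncPos ((List.range rows).map (fun i => gv g i j))).foldl (fun m i => bumpN m i j) m) v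
  (h2, v2)

-- ===== PRECONDITION & SPEC =====
-- Pre_ excludes the inputs where Python A raises IndexError: empty g (len(g[0])), and h/v too short
-- for an increment that the g-values force.  It conservatively also requires every row of g to be at
-- least as long as g[0], which excludes a few ragged-g inputs on which A happens to return because
-- the 1-values never force the out-of-range read (see cites; B raises IndexError there building a column).
def Pre_update_cap (h_ : List (List Int)) (v : List (List Int)) (g : List (List Int)) : Prop :=
  g ≠ [] ∧
  (g.all (fun r => decide ((g.getD 0 []).length ≤ r.length))) = true ∧
  ((List.range g.length).all (fun i => (List.range ((g.getD 0 []).length - 1)).all (fun j =>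
      !((g.getD i []).getD j 0 == 1 && (g.getD i []).getD (j + 1) 0 == 1)
      || (decide (i < h_.length) && decide (j < (h_.getD i []).length))))) = true ∧
  ((List.range (g.getD 0 []).length).all (fun i => (List.range (g.length - 1)).all (fun j =>
      !((g.getD j []).getD i 0 == 1 && (g.getD (j + 1) []).getD i 0 == 1)
      || (decide (j < v.length) && decide (i < (v.getD j []).length))))) = true
instance (h_ : List (List Int)) (v : List (List Int)) (g : List (List Int)) : Decidable (Pre_update_cap h_ v g) := by unfold Pre_update_cap; infer_instance

def pvWitness_update_cap : List (List Int) × List (List Int) × List (List Int) :=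
  ([[5]], [[0]], [[1, 1]])

def Spec_update_cap (h_ : List (List Int)) (v : List (List Int)) (g : List (List Int)) (out : List (List Int) × List (List Int)) : Prop := out = update_cap_alt h_ v g
instance (h_ : List (List Int)) (v : List (List Int)) (g : List (List Int)) (out : List (List Int) × List (List Int)) : Decidable (Spec_update_cap h_ v g out) := by unfold Spec_update_cap; infer_instance

-- ===== CLAIM (what is proved, stated in full; the proofs are below) =====
def Claim_equal_update_cap : Prop := ∀ (h_ : List (List Int)) (v : List (List Int)) (g : List (List Int)), Dom_update_cap h_ v g → Pre_update_cap h_ v g → Spec_update_cap h_ v g (update_cap h_ v g)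

-- ===== LEMMAS AND PROOFS =====

-- fold of conditional point-increments over a list of positions
def pairFold (P : Nat × Nat → Bool) (ps : List (Nat × Nat)) (m : List (List Int)) : List (List Int) :=
  ps.foldl (fun m p => if P p then bumpN m p.1 p.2 else m) m

-- the two grid conditions, as Bool predicates on positions
def PHb (g : List (List Int)) (p : Nat × Nat) : Bool := gv g p.1 p.2 == 1 && gv g p.1 (p.2 + 1) == 1
def PVb (g : List (List Int)) (p : Nat × Nat) : Bool := gv g p.1 p.2 == 1 && gv g (p.1 + 1) p.2 == 1

-- "index j starts an adjacent 1-pair of seq"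
def pvCond (seq : List Int) (j : Nat) : Prop :=
  j + 1 < seq.length ∧ seq.getD j 0 = 1 ∧ seq.getD (j + 1) 0 = 1

lemma pvG_natCast (g : List (List Int)) (i j : Nat) : pvG g (i : Int) (j : Int) = gv g i j := by
  simp [pvG, gv, PySem.List.pyGetD_natCast]

lemma pvBump_natCast (m : List (List Int)) (i j : Nat) : pvBump m (i : Int) (j : Int) = bumpN m i j := by
  simp [pvBump, bumpN]

lemma length_bumpN (m : List (List Int)) (i j : Nat) : (bumpN m i j).length = m.length := by
  simp [bumpN]

lemma rowlen_bumpN (m : List (List Int)) (i j k : Nat) :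
    ((bumpN m i j).getD k []).length = ((m.getD k []).length) := by
  simp only [bumpN, List.getD_eq_getElem?_getD, List.getElem?_modify]
  rcases h : m[k]? with _ | row <;> simp [h] <;> split_ifs <;> simp

lemma gv_bumpN (m : List (List Int)) (i j k l : Nat) :
    gv (bumpN m i j) k l =
      gv m k l + (if k = i ∧ l = j ∧ i < m.length ∧ j < (m.getD i []).length then 1 else 0) := by
  by_cases hik : k = i
  · subst hik
    by_cases hi : k < m.length
    · have hrow : m.getD k [] = m[k] := List.getD_eq_getElem m [] hi
      have hb : (bumpN m k j).getD k [] = (m[k]).modify j (· + 1) := by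
        simp [bumpN, List.getD_eq_getElem?_getD, List.getElem?_modify,
          List.getElem?_eq_getElem hi]
      rw [gv, gv, hb, hrow]
      by_cases hlj : l = j
      · subst hlj
        by_cases hj : l < (m[k]).length
        · have hsome : ((m[k]).modify l (· + 1))[l]? = some ((m[k])[l] + 1) := by
            simp [List.getElem?_modify, List.getElem?_eq_getElem hj]
          rw [List.getD_eq_getElem?_getD, hsome, Option.getD_some,
            List.getD_eq_getElem _ 0 hj, if_pos ⟨rfl, rfl, hi, hrow ▸ hj⟩]
        · have hnone : ((m[k]).modify l (· + 1))[l]? = none := by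
            rw [List.getElem?_eq_none_iff]
            simpa using Nat.le_of_not_lt hj
          have hnone' : (m[k])[l]? = none := by
            rw [List.getElem?_eq_none_iff]
            exact Nat.le_of_not_lt hj
          have hcond : ¬ (k = k ∧ l = l ∧ k < m.length ∧ l < (m[k]).length) := by
            rintro ⟨-, -, -, h⟩; exact hj h
          rw [List.getD_eq_getElem?_getD, hnone, List.getD_eq_getElem?_getD, hnone',
            if_neg hcond]
          simp
      · have hjl' : j ≠ l := fun h => hlj h.symm
        have hcond : ¬ (k = k ∧ l = j ∧ k < m.length ∧ j < (m[k]).length) := by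
          rintro ⟨-, h, -⟩; exact hlj h
        rw [List.getD_eq_getElem?_getD, List.getElem?_modify]
        simp only [hjl', if_false, List.getD_eq_getElem?_getD]
        simp [hlj]
    · have hnone : m[k]? = none := by
        rw [List.getElem?_eq_none_iff]; exact Nat.le_of_not_lt hi
      have h1 : (bumpN m k j).getD k [] = ([] : List Int) := by
        simp [bumpN, List.getD_eq_getElem?_getD, List.getElem?_modify, hnone]
      have h2 : m.getD k [] = ([] : List Int) := by
        simp [List.getD_eq_getElem?_getD, hnone]
      have hcond : ¬ (k = k ∧ j = j ∧ k < m.length ∧ j < (m.getD k []).length) := by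
        rintro ⟨-, -, h, -⟩; exact hi h
      rw [gv, gv, h1, h2]
      simp [hi]
  · have hik' : i ≠ k := fun h => hik h.symm
    have hget : (bumpN m i j).getD k [] = m.getD k [] := by
      simp [bumpN, List.getD_eq_getElem?_getD, List.getElem?_modify, hik']
    rw [gv, gv, hget, if_neg (by rintro ⟨h, -⟩; exact hik h)]
    simp

lemma pairFold_length (P : Nat × Nat → Bool) (ps : List (Nat × Nat)) (m : List (List Int)) :
    (pairFold P ps m).length = m.length := by
  induction ps generalizing m with
  | nil => rfl
  | cons p t ih =>
    simp only [pairFold, List.foldl_cons] at ih ⊢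
    rw [ih]
    split_ifs
    · exact length_bumpN m p.1 p.2
    · rfl

lemma pairFold_rowlen (P : Nat × Nat → Bool) (ps : List (Nat × Nat)) (m : List (List Int)) (k : Nat) :
    ((pairFold P ps m).getD k []).length = ((m.getD k []).length) := by
  induction ps generalizing m with
  | nil => rfl
  | cons p t ih =>
    simp only [pairFold, List.foldl_cons] at ih ⊢
    rw [ih]
    split_ifs
    · exact rowlen_bumpN m p.1 p.2 k
    · rfl

lemma gv_pairFold (P : Nat × Nat → Bool) (ps : List (Nat × Nat)) (hnd : ps.Nodup)
    (m : List (List Int)) (k l : Nat) :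
    gv (pairFold P ps m) k l =
      gv m k l + (if (k, l) ∈ ps ∧ P (k, l) ∧ k < m.length ∧ l < (m.getD k []).length then 1 else 0) := by
  induction ps generalizing m with
  | nil => simp [pairFold]
  | cons p t ih =>
    obtain ⟨pa, pb⟩ := p
    have hnd' : t.Nodup := hnd.of_cons
    have hpt : (pa, pb) ∉ t := (List.nodup_cons.mp hnd).1
    simp only [pairFold, List.foldl_cons] at ih ⊢
    by_cases hPp : P (pa, pb) = true
    · rw [if_pos hPp, ih hnd', gv_bumpN, length_bumpN, rowlen_bumpN]
      by_cases hkl : k = pa ∧ l = pb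
      · obtain ⟨rfl, rfl⟩ := hkl
        have hmm : (k, l) ∈ (k, l) :: t := List.mem_cons_self ..
        by_cases hr : k < m.length ∧ l < (m.getD k []).length
        · rw [if_pos ⟨rfl, rfl, hr.1, hr.2⟩, if_neg (by rintro ⟨h, -⟩; exact hpt h),
            if_pos ⟨hmm, hPp, hr.1, hr.2⟩]
          ring
        · rw [if_neg (by rintro ⟨-, -, h1, h2⟩; exact hr ⟨h1, h2⟩),
            if_neg (by rintro ⟨-, -, h1, h2⟩; exact hr ⟨h1, h2⟩),
            if_neg (by rintro ⟨-, -, h1, h2⟩; exact hr ⟨h1, h2⟩)]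
          ring
      · rw [if_neg (by rintro ⟨h1, h2, -⟩; exact hkl ⟨h1, h2⟩)]
        simp only [List.mem_cons, Prod.mk.injEq, hkl, false_or, add_zero]
    · rw [if_neg hPp, ih hnd']
      by_cases hP2 : P (k, l) = true
      · have hkl : ¬ (k = pa ∧ l = pb) := by rintro ⟨rfl, rfl⟩; exact hPp hP2
        simp only [List.mem_cons, Prod.mk.injEq, hkl, false_or]
      · simp [hP2]

lemma foldl_foldl_product (f : List (List Int) → Nat × Nat → List (List Int)) (is js : List Nat) (m : List (List Int)) :
    is.foldl (fun m i => js.foldl (fun m j => f m (i, j)) m) m = (is.product js).foldl f m := by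
  induction is generalizing m with
  | nil => rfl
  | cons a t ih =>
    have hprod : (a :: t).product js = js.map (Prod.mk a) ++ t.product js := rfl
    rw [hprod, List.foldl_append, List.foldl_map, List.foldl_cons, ih]

lemma pyGetD_zero (g : List (List Int)) : PySem.List.pyGetD g (0 : Int) [] = g.getD 0 [] := by
  exact_mod_cast PySem.List.pyGetD_natCast g 0 []

lemma foldl_pyRange_zero (f : List (List Int) → Int → List (List Int)) (n : Nat) (m0 : List (List Int)) :
    (PySem.List.pyRange 0 (n : Int)).foldl f m0 = (List.range n).foldl (fun m (i : Nat) => f m (i : Int)) m0 := by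
  rw [PySem.List.pyRange_zero_natCast, List.foldl_map]

lemma foldl_pyRange_sub_one (f : List (List Int) → Int → List (List Int)) (n : Nat) (m0 : List (List Int)) :
    (PySem.List.pyRange 0 ((n : Int) - 1)).foldl f m0 = (List.range (n - 1)).foldl (fun m (j : Nat) => f m (j : Int)) m0 := by
  rcases Nat.eq_zero_or_pos n with hn | hn
  · subst hn
    rw [show ((0 : Nat) : Int) - 1 = -1 by norm_num, PySem.List.pyRange_one_eq_nil (by norm_num)]
    rfl
  · have h1 : ((n : Int) - 1) = ((n - 1 : Nat) : Int) := by omega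
    rw [h1, PySem.List.pyRange_zero_natCast, List.foldl_map]

lemma if_and_eq {α : Type} (a b : Int) (x y : α) :
    (if a = 1 ∧ b = 1 then x else y) = (if (a == 1 && b == 1) = true then x else y) := by
  by_cases h : a = 1 ∧ b = 1
  · rw [if_pos h, if_pos (by simp [h.1, h.2])]
  · rw [if_neg h, if_neg (by simpa [Bool.and_eq_true, beq_iff_eq] using h)]

lemma updA_fst (h_ v g : List (List Int)) :
    (update_cap h_ v g).1 =
      pairFold (PHb g) ((List.range g.length).product (List.range ((g.getD 0 []).length - 1))) h_ := by
  have key := foldl_foldl_product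
    (fun m p => if (gv g p.1 p.2 == 1 && gv g p.1 (p.2 + 1) == 1) = true then bumpN m p.1 p.2 else m)
    (List.range g.length) (List.range ((g.getD 0 []).length - 1)) h_
  dsimp only at key
  simp only [update_cap, pyGetD_zero]
  rw [foldl_pyRange_zero]
  simp only [foldl_pyRange_sub_one, ← Nat.cast_add_one, pvG_natCast, pvBump_natCast, if_and_eq]
  rw [pairFold]
  simp only [PHb]
  exact key

lemma pairFold_map_swap (P : Nat × Nat → Bool) (ps : List (Nat × Nat)) (m : List (List Int)) :
    pairFold P (ps.map Prod.swap) m =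
      ps.foldl (fun m p => if P (p.2, p.1) then bumpN m p.2 p.1 else m) m := by
  rw [pairFold, List.foldl_map]
  rfl

lemma updA_snd (h_ v g : List (List Int)) :
    (update_cap h_ v g).2 =
      pairFold (PVb g) (((List.range (g.getD 0 []).length).product (List.range (g.length - 1))).map Prod.swap) v := by
  have key := foldl_foldl_product
    (fun m p => if (gv g p.2 p.1 == 1 && gv g (p.2 + 1) p.1 == 1) = true then bumpN m p.2 p.1 else m)
    (List.range (g.getD 0 []).length) (List.range (g.length - 1)) v
  dsimp only at key
  simp only [update_cap, pyGetD_zero]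
  rw [foldl_pyRange_zero]
  simp only [foldl_pyRange_sub_one, ← Nat.cast_add_one, pvG_natCast, pvBump_natCast, if_and_eq]
  rw [pairFold_map_swap]
  simp only [PVb]
  exact key

lemma mem_map_swap (ps : List (Nat × Nat)) (k l : Nat) :
    (k, l) ∈ ps.map Prod.swap ↔ (l, k) ∈ ps := by
  constructor
  · rintro hm
    obtain ⟨⟨a, b⟩, hab, he⟩ := List.mem_map.mp hm
    simp only [Prod.swap_prod_mk, Prod.mk.injEq] at he
    obtain ⟨rfl, rfl⟩ := he
    exact hab
  · intro hm
    exact List.mem_map.mpr ⟨(l, k), hm, rfl⟩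

-- ---------- B-side: characterisation of the run-length increment positions ----------

def incsOf (rs : List (Nat × Nat)) : List Nat := rs.flatMap (fun p => List.range' p.1 (p.2 - 1))

lemma getD_repl_append (n d : Nat) (r : List Int) :
    (List.replicate n (1 : Int) ++ r).getD d 0 = if d < n then 1 else r.getD (d - n) 0 := by
  by_cases hd : d < n
  · rw [if_pos hd, List.getD_eq_getElem?_getD,
      List.getElem?_append_left (by simpa using hd), List.getElem?_replicate, if_pos hd]
    rfl
  · rw [if_neg hd, List.getD_eq_getElem?_getD,
      List.getElem?_append_right (by simpa using Nat.le_of_not_lt hd), List.length_replicate,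
      List.getD_eq_getElem?_getD]

lemma runsAux_spec (t : List Int) : ∀ (k : Nat),
    ((∀ j, j ∈ incsOf (pvRunsAux t k none) ↔ ∃ d, pvCond t d ∧ j = k + d)
      ∧ (incsOf (pvRunsAux t k none)).Nodup)
    ∧ (∀ s, s ≤ k →
        ((∀ j, j ∈ incsOf (pvRunsAux t k (some s)) ↔
            ∃ d, pvCond (List.replicate (k - s) 1 ++ t) d ∧ j = s + d)
          ∧ (incsOf (pvRunsAux t k (some s))).Nodup)) := by
  induction t with
  | nil =>
    intro k
    refine ⟨⟨?_, ?_⟩, ?_⟩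
    · intro j
      simp [pvRunsAux, incsOf, pvCond]
    · simp [pvRunsAux, incsOf]
    · intro s hs
      refine ⟨?_, ?_⟩
      · intro j
        simp only [pvRunsAux, incsOf, List.flatMap_cons, List.flatMap_nil, List.append_nil,
          pvCond, List.length_replicate]
        rw [List.mem_range'_1]
        have hget : ∀ d', d' < k - s → (List.replicate (k - s) (1 : Int)).getD d' 0 = 1 := by
          intro d' hd'
          rw [List.getD_eq_getElem?_getD, List.getElem?_replicate, if_pos hd']
          rfl
        constructor
        · rintro ⟨hle, hlt⟩
          exact ⟨j - s, ⟨by omega, hget _ (by omega), hget _ (by omega)⟩, by omega⟩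
        · rintro ⟨d, ⟨hlen, -, -⟩, rfl⟩
          omega
      · simp only [pvRunsAux, incsOf, List.flatMap_cons, List.flatMap_nil, List.append_nil]
        exact List.nodup_range'
  | cons x t ih =>
    intro k
    constructor
    · -- state none
      by_cases hx : x = 1
      · subst hx
        have h1 : pvRunsAux (1 :: t) k none = pvRunsAux t (k + 1) (some k) := by
          simp [pvRunsAux]
        have hIH := (ih (k + 1)).2 k (by omega)
        refine ⟨?_, by rw [h1]; exact hIH.2⟩
        intro j
        rw [h1, hIH.1 j]
        have hrepl : List.replicate (k + 1 - k) (1 : Int) ++ t = 1 :: t := by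
          simp [show k + 1 - k = 1 by omega]
        rw [hrepl]
      · have h1 : pvRunsAux (x :: t) k none = pvRunsAux t (k + 1) none := by
          simp [pvRunsAux, hx]
        have hIH := (ih (k + 1)).1
        refine ⟨?_, by rw [h1]; exact hIH.2⟩
        intro j
        rw [h1, hIH.1 j]
        constructor
        · rintro ⟨d, hc, rfl⟩
          exact ⟨d + 1, by
            simpa [pvCond, List.getD_cons_succ] using hc, by omega⟩
        · rintro ⟨d, hc, rfl⟩
          rcases d with _ | d
          · exact absurd hc.2.1 (by simpa using hx)
          · refine ⟨d, by simpa [pvCond, List.getD_cons_succ] using hc, by omega⟩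
    · -- state some s
      intro s hs
      by_cases hx : x = 1
      · subst hx
        have h1 : pvRunsAux (1 :: t) k (some s) = pvRunsAux t (k + 1) (some s) := by
          simp [pvRunsAux]
        have hIH := (ih (k + 1)).2 s (by omega)
        refine ⟨?_, by rw [h1]; exact hIH.2⟩
        intro j
        rw [h1, hIH.1 j]
        have hrepl : List.replicate (k + 1 - s) (1 : Int) ++ t
            = List.replicate (k - s) (1 : Int) ++ 1 :: t := by
          rw [show k + 1 - s = (k - s) + 1 by omega, List.replicate_succ',
            List.append_assoc, List.singleton_append]
        rw [hrepl]
      · have h1 : pvRunsAux (x :: t) k (some s) = (s, k - s) :: pvRunsAux t (k + 1) none := by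
          simp [pvRunsAux, hx]
        have hIH := (ih (k + 1)).1
        have hmem : ∀ j, j ∈ incsOf (pvRunsAux (x :: t) k (some s)) ↔
            ∃ d, pvCond (List.replicate (k - s) 1 ++ x :: t) d ∧ j = s + d := by
          intro j
          rw [h1]
          simp only [incsOf, List.flatMap_cons, List.mem_append, List.mem_range']
          rw [show (pvRunsAux t (k + 1) none).flatMap (fun p => List.range' p.1 (p.2 - 1))
              = incsOf (pvRunsAux t (k + 1) none) from rfl, hIH.1 j]
          constructor
          · rintro (⟨hle, hlt⟩ | ⟨d, ⟨hlen, hd1, hd2⟩, rfl⟩)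
            · refine ⟨j - s, ⟨?_, ?_, ?_⟩, by omega⟩
              · simp only [List.length_append, List.length_replicate, List.length_cons]; omega
              · rw [getD_repl_append, if_pos (by omega)]
              · rw [getD_repl_append, if_pos (by omega)]
            · refine ⟨k - s + 1 + d, ⟨?_, ?_, ?_⟩, by omega⟩
              · simp only [List.length_append, List.length_replicate, List.length_cons]; omega
              · rw [getD_repl_append, if_neg (by omega),
                  show k - s + 1 + d - (k - s) = d + 1 by omega, List.getD_cons_succ]
                exact hd1
              · rw [getD_repl_append, if_neg (by omega),
                  show k - s + 1 + d + 1 - (k - s) = d + 1 + 1 by omega, List.getD_cons_succ]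
                exact hd2
          · rintro ⟨d, ⟨hlen, hd1, hd2⟩, rfl⟩
            simp only [List.length_append, List.length_replicate, List.length_cons] at hlen
            by_cases hda : d + 1 < k - s
            · exact Or.inl ⟨by omega, by omega⟩
            · by_cases hdb : d < k - s
              · -- d + 1 = k - s : the pair (last replicate 1, x) — contradiction with x ≠ 1
                rw [getD_repl_append, if_neg (by omega),
                  show d + 1 - (k - s) = 0 by omega, List.getD_cons_zero] at hd2
                exact absurd hd2 hx
              · by_cases hdc : d = k - s
                · rw [getD_repl_append, if_neg (by omega),
                    show d - (k - s) = 0 by omega, List.getD_cons_zero] at hd1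
                  exact absurd hd1 hx
                · refine Or.inr ⟨d - (k - s) - 1, ⟨by omega, ?_, ?_⟩, by omega⟩
                  · rw [getD_repl_append, if_neg (by omega),
                      show d - (k - s) = (d - (k - s) - 1) + 1 by omega,
                      List.getD_cons_succ] at hd1
                    exact hd1
                  · rw [getD_repl_append, if_neg (by omega),
                      show d + 1 - (k - s) = (d - (k - s) - 1) + 1 + 1 by omega,
                      List.getD_cons_succ] at hd2
                    exact hd2
        refine ⟨hmem, ?_⟩
        rw [h1]
        simp only [incsOf, List.flatMap_cons]
        rw [show (pvRunsAux t (k + 1) none).flatMap (fun p => List.range' p.1 (p.2 - 1))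
            = incsOf (pvRunsAux t (k + 1) none) from rfl]
        refine List.Nodup.append List.nodup_range' hIH.2 ?_
        intro a ha hb
        rw [List.mem_range'] at ha
        obtain ⟨d, -, rfl⟩ := (hIH.1 a).mp hb
        omega

lemma mem_incPos (seq : List Int) (j : Nat) : j ∈ pvIncPos seq ↔ pvCond seq j := by
  rw [show pvIncPos seq = incsOf (pvRunsAux seq 0 none) from rfl,
    ((runsAux_spec seq 0).1.1 j)]
  constructor
  · rintro ⟨d, hc, rfl⟩; simpa using hc
  · intro hc; exact ⟨j, hc, by omega⟩

lemma nodup_incPos (seq : List Int) : (pvIncPos seq).Nodup :=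
  (runsAux_spec seq 0).1.2

-- ---------- B-side: both folds are pairFolds over flatMap position lists ----------

lemma foldl_bump_flatMap (b : Nat → Nat → Nat × Nat) (l : List Nat) (f : Nat → List Nat)
    (m0 : List (List Int)) :
    l.foldl (fun m i => (f i).foldl (fun m j => bumpN m (b i j).1 (b i j).2) m) m0
      = pairFold (fun _ => true) (l.flatMap (fun i => (f i).map (b i))) m0 := by
  induction l generalizing m0 with
  | nil => rfl
  | cons a t ih =>
    simp only [List.foldl_cons, List.flatMap_cons, pairFold, List.foldl_append, List.foldl_map,
      if_pos] at ih ⊢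
    rw [ih]

lemma mem_flatMap_pairs_fst (n : Nat) (f : Nat → List Nat) (k l : Nat) :
    (k, l) ∈ (List.range n).flatMap (fun i => (f i).map (fun j => (i, j))) ↔ k < n ∧ l ∈ f k := by
  simp only [List.mem_flatMap, List.mem_map, List.mem_range, Prod.mk.injEq]
  constructor
  · rintro ⟨i, hi, j, hj, rfl, rfl⟩; exact ⟨hi, hj⟩
  · rintro ⟨hk, hl⟩; exact ⟨k, hk, l, hl, rfl, rfl⟩

lemma mem_flatMap_pairs_snd (n : Nat) (f : Nat → List Nat) (k l : Nat) :
    (k, l) ∈ (List.range n).flatMap (fun j => (f j).map (fun i => (i, j))) ↔ l < n ∧ k ∈ f l := by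
  simp only [List.mem_flatMap, List.mem_map, List.mem_range, Prod.mk.injEq]
  constructor
  · rintro ⟨j, hj, i, hi, rfl, rfl⟩; exact ⟨hj, hi⟩
  · rintro ⟨hl, hk⟩; exact ⟨l, hl, k, hk, rfl, rfl⟩

lemma nodup_flatMap_pairs_fst (n : Nat) (f : Nat → List Nat) (hf : ∀ i, (f i).Nodup) :
    ((List.range n).flatMap (fun i => (f i).map (fun j => (i, j)))).Nodup := by
  induction n with
  | zero => simp
  | succ n ih =>
    rw [List.range_succ, List.flatMap_append]
    refine List.Nodup.append ih ?_ ?_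
    · simp only [List.flatMap_cons, List.flatMap_nil, List.append_nil]
      exact (hf n).map (fun a b hab => by simpa using hab)
    · rintro ⟨k, l⟩ ha hb
      simp only [List.flatMap_cons, List.flatMap_nil, List.append_nil, List.mem_map] at hb
      obtain ⟨j, -, he⟩ := hb
      obtain ⟨rfl, rfl⟩ := Prod.mk.injEq .. ▸ he
      rw [mem_flatMap_pairs_fst] at ha
      omega

lemma nodup_flatMap_pairs_snd (n : Nat) (f : Nat → List Nat) (hf : ∀ i, (f i).Nodup) :
    ((List.range n).flatMap (fun j => (f j).map (fun i => (i, j)))).Nodup := by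
  induction n with
  | zero => simp
  | succ n ih =>
    rw [List.range_succ, List.flatMap_append]
    refine List.Nodup.append ih ?_ ?_
    · simp only [List.flatMap_cons, List.flatMap_nil, List.append_nil]
      exact (hf n).map (fun a b hab => by simpa using hab)
    · rintro ⟨k, l⟩ ha hb
      simp only [List.flatMap_cons, List.flatMap_nil, List.append_nil, List.mem_map] at hb
      obtain ⟨j, -, he⟩ := hb
      obtain ⟨rfl, rfl⟩ := Prod.mk.injEq .. ▸ he
      rw [mem_flatMap_pairs_snd] at ha
      omega

lemma getElem_eq_gv (m : List (List Int)) (k l : Nat) (hk : k < m.length) (hl : l < (m[k]'hk).length) :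
    (m[k]'hk)[l]'hl = gv m k l := by
  rw [gv, List.getD_eq_getElem m [] hk, List.getD_eq_getElem _ 0 hl]

-- two conditional increment folds agree when their (position, predicate) filters agree in range
lemma pairFold_ext (P Q : Nat × Nat → Bool) (ps qs : List (Nat × Nat))
    (hp : ps.Nodup) (hq : qs.Nodup) (m : List (List Int))
    (hiff : ∀ k l, k < m.length → l < (m.getD k []).length →
      (((k, l) ∈ ps ∧ P (k, l)) ↔ ((k, l) ∈ qs ∧ Q (k, l)))) :
    pairFold P ps m = pairFold Q qs m := by
  apply List.ext_getElem
  · rw [pairFold_length, pairFold_length]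
  · intro k hk1 hk2
    have hk : k < m.length := by rwa [pairFold_length] at hk1
    apply List.ext_getElem
    · rw [← List.getD_eq_getElem _ ([] : List Int) hk1, ← List.getD_eq_getElem _ ([] : List Int) hk2,
        pairFold_rowlen, pairFold_rowlen]
    · intro l hl1 hl2
      have hl : l < (m.getD k []).length := by
        rw [← List.getD_eq_getElem _ ([] : List Int) hk1, pairFold_rowlen] at hl1
        exact hl1
      rw [getElem_eq_gv _ _ _ hk1 hl1, getElem_eq_gv _ _ _ hk2 hl2,
        gv_pairFold _ _ hp, gv_pairFold _ _ hq]
      congr 1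
      apply if_congr ?_ rfl rfl
      constructor
      · rintro ⟨h1, h2, h3, h4⟩
        obtain ⟨h1', h2'⟩ := (hiff k l hk hl).mp ⟨h1, h2⟩
        exact ⟨h1', h2', h3, h4⟩
      · rintro ⟨h1, h2, h3, h4⟩
        obtain ⟨h1', h2'⟩ := (hiff k l hk hl).mpr ⟨h1, h2⟩
        exact ⟨h1', h2', h3, h4⟩

lemma getD_take (r : List Int) (n i : Nat) (hi : i < n) :
    (r.take n).getD i 0 = r.getD i 0 := by
  rw [List.getD_eq_getElem?_getD, List.getD_eq_getElem?_getD, List.getElem?_take_of_lt hi]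

lemma getD_map_range (n k : Nat) (f : Nat → Int) (hk : k < n) :
    ((List.range n).map f).getD k 0 = f k := by
  rw [List.getD_eq_getElem?_getD, List.getElem?_map, List.getElem?_range hk]
  rfl

theorem update_cap_eq (h_ v g : List (List Int))
    (hrag : ∀ r ∈ g, (g.getD 0 []).length ≤ r.length) :
    update_cap h_ v g = update_cap_alt h_ v g := by
  have hBfst : (update_cap_alt h_ v g).1 =
      pairFold (fun _ => true)
        ((List.range g.length).flatMap (fun i =>
          (pvIncPos ((g.getD i []).take (g.getD 0 []).length)).map (fun j => (i, j)))) h_ := by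
    simp only [update_cap_alt, pyGetD_zero]
    exact foldl_bump_flatMap (fun i j => (i, j)) (List.range g.length) _ h_
  have hBsnd : (update_cap_alt h_ v g).2 =
      pairFold (fun _ => true)
        ((List.range (g.getD 0 []).length).flatMap (fun j =>
          (pvIncPos ((List.range g.length).map (fun i => gv g i j))).map (fun i => (i, j)))) v := by
    simp only [update_cap_alt, pyGetD_zero]
    exact foldl_bump_flatMap (fun j i => (i, j)) (List.range (g.getD 0 []).length) _ v
  rw [Prod.ext_iff]
  constructor
  · rw [updA_fst, hBfst]
    apply pairFold_ext _ _ _ _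
      (List.nodup_range.product List.nodup_range)
      (nodup_flatMap_pairs_fst _ _ (fun i => nodup_incPos _)) h_
    intro k l _ _
    constructor
    · rintro ⟨hmem, hP⟩
      obtain ⟨hk, hl⟩ := List.pair_mem_product.mp hmem
      rw [List.mem_range] at hk hl
      obtain ⟨h1, h2⟩ : gv g k l = 1 ∧ gv g k (l + 1) = 1 := by
        simpa [PHb] using hP
      have hrow : (g.getD 0 []).length ≤ (g.getD k []).length :=
        hrag _ (List.getD_eq_getElem g [] hk ▸ List.getElem_mem hk)
      refine ⟨(mem_flatMap_pairs_fst _ _ _ _).mpr ⟨hk, (mem_incPos _ _).mpr ?_⟩, rfl⟩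
      refine ⟨?_, ?_, ?_⟩
      · rw [List.length_take]; omega
      · rw [getD_take _ _ _ (by omega)]; exact h1
      · rw [getD_take _ _ _ (by omega)]; exact h2
    · rintro ⟨hmem, -⟩
      obtain ⟨hk, hl⟩ := (mem_flatMap_pairs_fst _ _ _ _).mp hmem
      obtain ⟨hlen, h1, h2⟩ := (mem_incPos _ _).mp hl
      have hrow : (g.getD 0 []).length ≤ (g.getD k []).length :=
        hrag _ (List.getD_eq_getElem g [] hk ▸ List.getElem_mem hk)
      rw [List.length_take] at hlen
      rw [getD_take _ _ _ (by omega)] at h1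
      rw [getD_take _ _ _ (by omega)] at h2
      refine ⟨List.pair_mem_product.mpr ⟨List.mem_range.mpr hk, List.mem_range.mpr (by omega)⟩, ?_⟩
      simp only [PHb, Bool.and_eq_true, beq_iff_eq]
      exact ⟨h1, h2⟩
  · rw [updA_snd, hBsnd]
    apply pairFold_ext _ _ _ _
      ((List.nodup_range.product List.nodup_range).map Prod.swap_injective)
      (nodup_flatMap_pairs_snd _ _ (fun j => nodup_incPos _)) v
    intro k l _ _
    constructor
    · rintro ⟨hmem, hP⟩
      obtain ⟨hl, hk⟩ := List.pair_mem_product.mp ((mem_map_swap _ _ _).mp hmem)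
      rw [List.mem_range] at hk hl
      obtain ⟨h1, h2⟩ : gv g k l = 1 ∧ gv g (k + 1) l = 1 := by
        simpa [PVb] using hP
      refine ⟨(mem_flatMap_pairs_snd _ _ _ _).mpr ⟨hl, (mem_incPos _ _).mpr ?_⟩, rfl⟩
      refine ⟨?_, ?_, ?_⟩
      · simp only [List.length_map, List.length_range]; omega
      · rw [getD_map_range _ _ _ (by omega)]; exact h1
      · rw [getD_map_range _ _ _ (by omega)]; exact h2
    · rintro ⟨hmem, -⟩
      obtain ⟨hl, hk⟩ := (mem_flatMap_pairs_snd _ _ _ _).mp hmem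
      obtain ⟨hlen, h1, h2⟩ := (mem_incPos _ _).mp hk
      simp only [List.length_map, List.length_range] at hlen
      rw [getD_map_range _ _ _ (by omega)] at h1
      rw [getD_map_range _ _ _ (by omega)] at h2
      refine ⟨(mem_map_swap _ _ _).mpr
        (List.pair_mem_product.mpr ⟨List.mem_range.mpr hl, List.mem_range.mpr (by omega)⟩), ?_⟩
      simp [PVb, h1, h2]

-- ===== VERDICT (by name: the statement is the Claim_ definition above) =====
theorem update_cap_spec : Claim_equal_update_cap := by
  intro h_ v g _ hpre
  unfold Spec_update_cap
  refine update_cap_eq h_ v g ?_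
  intro r hr
  exact of_decide_eq_true (List.all_eq_true.mp hpre.2.1 r hr)
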